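-- pv_equiv track=rewrite | github.com/antoncp/training_exercises | TakeTenMinutesWalk.py | is_valid_walk
-- ===== SOURCE A (Python) =====
-- def is_valid_walk(walk):
--     if len(walk) != 10:
--         return False
--     ver, hor = 0, 0
--     for i in walk:
--         if i == 'n':
--             ver += 1
--         elif i == 's':
--             ver -= 1
--         elif i == 'w':
--             hor += 1
--         elif i == 'e':
--             hor -= 1
--     if ver == 0 and hor == 0:
--         return True
--     else:
--         return False
-- ===== SOURCE B (Python) =====
-- def is_valid_walk(walk):
--     if len(walk) != 10:
--         return False
--     return walk.count('n') == walk.count('s') and walk.count('w') == walk.count('e')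
-- ===== Notes on version B (the rewrite author's own statement) =====
-- stated objective: idiomatic
-- what changed: B replaces the two signed running totals over a single hand-written loop by per-direction frequency counts (walk.count) and decides via pairwise count equality.
import Mathlib
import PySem

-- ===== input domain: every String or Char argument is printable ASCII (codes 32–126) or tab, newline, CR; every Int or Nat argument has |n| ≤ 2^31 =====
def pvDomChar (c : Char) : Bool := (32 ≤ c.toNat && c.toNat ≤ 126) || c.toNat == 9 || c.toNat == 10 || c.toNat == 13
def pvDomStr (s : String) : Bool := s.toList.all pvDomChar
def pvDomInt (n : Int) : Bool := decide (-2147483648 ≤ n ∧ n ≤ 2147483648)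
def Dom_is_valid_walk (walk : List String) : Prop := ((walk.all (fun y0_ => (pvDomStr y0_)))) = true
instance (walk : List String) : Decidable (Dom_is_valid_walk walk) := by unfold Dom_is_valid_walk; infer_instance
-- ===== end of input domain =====

-- B maintains four direction counts instead of A's two signed running totals; idiomatic, same cost.

-- ===== PORT A =====
def is_valid_walk (walk : List String) : Bool :=
  if walk.length ≠ 10 then false
  else
    let (ver, hor) := walk.foldl (fun (st : Int × Int) i =>
      if i == "n" then (st.1 + 1, st.2)
      else if i == "s" then (st.1 - 1, st.2)
      else if i == "w" then (st.1, st.2 + 1)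
      else if i == "e" then (st.1, st.2 - 1)
      else st) (0, 0)
    if ver == 0 && hor == 0 then true else false

-- ===== PORT B =====
def is_valid_walk_alt (walk : List String) : Bool :=
  if walk.length ≠ 10 then false
  else PySem.List.count walk "n" == PySem.List.count walk "s"
    && PySem.List.count walk "w" == PySem.List.count walk "e"

-- ===== PRECONDITION & SPEC =====
def Spec_is_valid_walk (walk : List String) (out : Bool) : Prop := out = is_valid_walk_alt walk
instance (walk : List String) (out : Bool) : Decidable (Spec_is_valid_walk walk out) := by unfold Spec_is_valid_walk; infer_instance

-- ===== CLAIM (what is proved, stated in full; the proofs are below) =====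
def Claim_equal_is_valid_walk : Prop := ∀ (walk : List String), Dom_is_valid_walk walk → Spec_is_valid_walk walk (is_valid_walk walk)

-- ===== LEMMAS AND PROOFS =====

lemma walk_fold_counts (walk : List String) (v h : Int) :
    walk.foldl (fun (st : Int × Int) i =>
      if i == "n" then (st.1 + 1, st.2)
      else if i == "s" then (st.1 - 1, st.2)
      else if i == "w" then (st.1, st.2 + 1)
      else if i == "e" then (st.1, st.2 - 1)
      else st) (v, h)
    = (v + (PySem.List.count walk "n" : Int) - PySem.List.count walk "s",
       h + (PySem.List.count walk "w" : Int) - PySem.List.count walk "e") := by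
  induction walk generalizing v h with
  | nil => simp [PySem.List.count]
  | cons x xs ih =>
    rw [List.foldl_cons]
    by_cases hn : x = "n" <;> by_cases hs : x = "s" <;> by_cases hw : x = "w" <;>
      by_cases he : x = "e" <;>
        simp_all [ih, PySem.List.count, List.count_cons, Prod.ext_iff] <;> omega

-- ===== VERDICT (by name: the statement is the Claim_ definition above) =====
theorem is_valid_walk_spec : Claim_equal_is_valid_walk := by
  intro walk _
  show is_valid_walk walk = is_valid_walk_alt walk
  unfold is_valid_walk is_valid_walk_alt
  by_cases hl : walk.length ≠ 10
  · simp [hl]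
  · simp only [hl, if_false]
    rw [walk_fold_counts]
    by_cases h1 : PySem.List.count walk "n" = PySem.List.count walk "s" <;>
      by_cases h2 : PySem.List.count walk "w" = PySem.List.count walk "e" <;>
        simp only [PySem.List.count] at h1 h2 ⊢ <;>
          simp [h1, h2, sub_eq_zero, Int.natCast_inj] <;> omega
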